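-- pv_equiv track=rewrite | github.com/mhcoen/mcloop | mcloop/prompts.py | parse_bugs_md
-- ===== SOURCE A (Python) =====
-- def parse_bugs_md(content: str) -> list[dict[str, str]]:
--     """Parse BUGS.md into a list of bug entries.
--
--     Each entry has keys: header, title, body (full text of that section).
--     """
--     bugs: list[dict[str, str]] = []
--     lines = content.splitlines(keepends=True)
--     current: dict[str, str] | None = None
--     body_lines: list[str] = []
--
--     for line in lines:
--         if line.startswith("## "):
--             if current is not None:
--                 current["body"] = "".join(body_lines).strip()
--                 bugs.append(current)
--             header = line.strip().lstrip("#").strip()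
--             current = {"header": header, "title": header, "body": ""}
--             body_lines = [line]
--         elif current is not None:
--             body_lines.append(line)
--
--     if current is not None:
--         current["body"] = "".join(body_lines).strip()
--         bugs.append(current)
--
--     return bugs
-- ===== SOURCE B (Python) =====
-- def parse_bugs_md(content: str) -> list[dict[str, str]]:
--     lines = content.splitlines(keepends=True)
--     # drop any preamble before the first section header
--     while lines and not lines[0].startswith("## "):
--         lines = lines[1:]
--     return _sections(lines)
--
--
-- def _sections(lines):
--     # lines is empty or starts with a "## " header line
--     if not lines:
--         return []
--     line, rest = lines[0], lines[1:]
--     k = 0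
--     while k < len(rest) and not rest[k].startswith("## "):
--         k += 1
--     header = line.strip().lstrip("#").strip()
--     body = "".join([line] + rest[:k]).strip()
--     return [{"header": header, "title": header, "body": body}] + _sections(rest[k:])
-- ===== Notes on version B (the rewrite author's own statement) =====
-- stated objective: simpler
-- what changed: Replaced A's single streaming fold with mutable current/body_lines state by a recursive section splitter: drop the preamble before the first section-header line, then repeatedly take a header line plus its span of following non-header lines and emit the entry.
import Mathlib
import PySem

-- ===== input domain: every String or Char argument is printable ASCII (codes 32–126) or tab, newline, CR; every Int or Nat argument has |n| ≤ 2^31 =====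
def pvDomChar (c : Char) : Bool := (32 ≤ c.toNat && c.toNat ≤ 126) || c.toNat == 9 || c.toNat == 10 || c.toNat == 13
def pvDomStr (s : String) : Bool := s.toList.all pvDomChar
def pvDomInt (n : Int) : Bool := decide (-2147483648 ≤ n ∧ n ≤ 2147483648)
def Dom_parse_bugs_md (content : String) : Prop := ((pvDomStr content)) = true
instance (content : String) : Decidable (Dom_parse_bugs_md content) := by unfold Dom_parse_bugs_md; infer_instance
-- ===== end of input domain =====

-- B replaces A's streaming fold with Option state by a recursive section splitter
-- (drop the preamble, then header + span of non-header lines per section); objective: simpler.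

-- content.splitlines(keepends=True), hand-ported: exact on the Dom alphabet, where the
-- only line boundaries Python recognises are '\n', '\r' and '\r\n'.
def pvSplitKeepends (acc : List Char) : List Char → List (List Char)
  | [] => if acc.isEmpty then [] else [acc.reverse]
  | c :: rest =>
    if c = '\n' then (acc.reverse ++ ['\n']) :: pvSplitKeepends [] rest
    else if c = '\r' then
      if rest.head? = some '\n' then
        (acc.reverse ++ ['\r', '\n']) :: pvSplitKeepends [] rest.tail
      else (acc.reverse ++ ['\r']) :: pvSplitKeepends [] rest
    else pvSplitKeepends (c :: acc) rest
  termination_by ls => ls.length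
  decreasing_by all_goals (simp [List.length_tail]; try omega)

-- line.startswith("## ")
def pvIsHdr (l : List Char) : Bool := PySem.Chars.startswith l ['#', '#', ' ']

-- line.strip().lstrip("#").strip()
def pvHeaderOf (l : List Char) : List Char :=
  PySem.Chars.strip ((PySem.Chars.strip l).dropWhile (fun c => c == '#'))

-- "".join(ls).strip()
def pvBodyStr (ls : List (List Char)) : String :=
  String.ofList (PySem.Chars.strip (PySem.Chars.join [] ls))

-- ===== PORT A =====
-- {"header": h, "title": h, "body": ""}
def pvDictOf (h : List Char) : PySem.Dict String String :=
  (((PySem.Dict.empty : PySem.Dict String String).insert "header" (String.ofList h)).insert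
      "title" (String.ofList h)).insert "body" ""

-- current["body"] = "".join(body_lines).strip(); bugs.append(current)
def pvFlush (d : PySem.Dict String String) (body : List (List Char)) : List (String × String) :=
  (d.insert "body" (pvBodyStr body)).items

def pvLoopA : List (List Char) → List (List (String × String)) →
    Option (PySem.Dict String String) → List (List Char) → List (List (String × String))
  | [], bugs, cur, body =>
    match cur with
    | some d => bugs ++ [pvFlush d body]
    | none => bugs
  | line :: rest, bugs, cur, body =>
    if pvIsHdr line then
      let bugs' :=
        match cur with
        | some d => bugs ++ [pvFlush d body]
        | none => bugs
      pvLoopA rest bugs' (some (pvDictOf (pvHeaderOf line))) [line]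
    else
      match cur with
      | some d => pvLoopA rest bugs (some d) (body ++ [line])
      | none => pvLoopA rest bugs none body

def parse_bugs_md (content : String) : List (List (String × String)) :=
  pvLoopA (pvSplitKeepends [] content.toList) [] none []

-- ===== PORT B =====
-- [{"header": header, "title": header, "body": body}]
def pvEntry (line : List Char) (body : List (List Char)) : List (String × String) :=
  let h := String.ofList (pvHeaderOf line)
  [("header", h), ("title", h), ("body", pvBodyStr (line :: body))]

def pvSectionsB : List (List Char) → List (List (String × String))
  | [] => []
  | line :: rest =>
    pvEntry line (rest.takeWhile (fun l => !pvIsHdr l)) ::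
      pvSectionsB (rest.dropWhile (fun l => !pvIsHdr l))
  termination_by ls => ls.length
  decreasing_by
    exact Nat.lt_succ_of_le (List.length_dropWhile_le _ _)

def parse_bugs_md_alt (content : String) : List (List (String × String)) :=
  pvSectionsB ((pvSplitKeepends [] content.toList).dropWhile (fun l => !pvIsHdr l))

-- ===== PRECONDITION & SPEC =====
def Spec_parse_bugs_md (content : String) (out : List (List (String × String))) : Prop := out = parse_bugs_md_alt content
instance (content : String) (out : List (List (String × String))) : Decidable (Spec_parse_bugs_md content out) := by unfold Spec_parse_bugs_md; infer_instance

-- ===== CLAIM (what is proved, stated in full; the proofs are below) =====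
def Claim_equal_parse_bugs_md : Prop := ∀ (content : String), Dom_parse_bugs_md content → Spec_parse_bugs_md content (parse_bugs_md content)

-- ===== LEMMAS AND PROOFS =====

-- flushing the freshly created dict is B's entry
theorem pvFlush_dictOf (h : List Char) (body : List (List Char)) :
    pvFlush (pvDictOf h) body =
      [("header", String.ofList h), ("title", String.ofList h), ("body", pvBodyStr body)] := by
  rfl

-- inside a section: A's fold finishes the current section with the span of
-- non-header lines and then behaves like B's splitter on the rest
theorem pvLoopA_some (lines : List (List Char)) (bugs : List (List (String × String)))
    (d : PySem.Dict String String) (body : List (List Char)) :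
    pvLoopA lines bugs (some d) body =
      bugs ++ (pvFlush d (body ++ lines.takeWhile (fun l => !pvIsHdr l)) ::
        pvSectionsB (lines.dropWhile (fun l => !pvIsHdr l))) := by
  induction lines generalizing bugs d body with
  | nil => simp [pvLoopA, pvSectionsB]
  | cons line rest ih =>
    by_cases hl : pvIsHdr line = true
    · simp only [pvLoopA, hl, List.takeWhile_cons, List.dropWhile_cons, Bool.not_true, ite_true]
      rw [ih]
      simp [pvSectionsB, pvFlush_dictOf, pvEntry]
    · have hl' : pvIsHdr line = false := by simpa using hl
      simp only [pvLoopA, hl', List.takeWhile_cons, List.dropWhile_cons, Bool.not_false,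
        ite_true, ite_false, Bool.false_eq_true]
      rw [ih]
      simp [List.append_assoc]

-- before the first header: A skips lines exactly like B's dropWhile
theorem pvLoopA_none (lines : List (List Char)) (bugs : List (List (String × String)))
    (body : List (List Char)) :
    pvLoopA lines bugs none body =
      bugs ++ pvSectionsB (lines.dropWhile (fun l => !pvIsHdr l)) := by
  induction lines generalizing body with
  | nil => simp [pvLoopA, pvSectionsB]
  | cons line rest ih =>
    by_cases hl : pvIsHdr line = true
    · simp only [pvLoopA, hl, ite_true]
      rw [pvLoopA_some]
      simp [pvSectionsB, pvFlush_dictOf, pvEntry, hl]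
    · have hl' : pvIsHdr line = false := by simpa using hl
      simp only [pvLoopA, hl', ite_false, Bool.false_eq_true]
      rw [ih, List.dropWhile_cons]
      simp [hl']

-- ===== VERDICT (by name: the statement is the Claim_ definition above) =====
theorem parse_bugs_md_spec : Claim_equal_parse_bugs_md := by
  intro content _
  unfold Spec_parse_bugs_md parse_bugs_md parse_bugs_md_alt
  exact pvLoopA_none _ _ _
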